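-- pv_equiv track=rewrite | github.com/mihau11/jazda | mindGame/main.py | raf_kol
-- ===== SOURCE A (Python) =====
-- def getA(a,bl):
--     if bl-1 in a: return bl-1
--     elif bl==0: return a[len(a)-1]
--     else:
--         for i in range(len(a)):
--             if bl-i in a: return bl-i
--     return a[len(a)-1]
--
-- def raf_kol(n):
--     a=[x for x in range(n)]
--     b=[x for x in range(n)]
--     score={"a":0, "b":0}
--     bx=0
--     bl=bx
--     ax=len(a)-1
--     if ax>bx: score["a"]+=1
--     elif bx>ax: score["b"]+=1
--     a.remove(ax)
--     b.remove(bx)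
--     for bx in b:
--         ax=getA(a,bl)
--         if ax>bx: score["a"]+=1
--         elif bx>ax: score["b"]+=1
--         a.remove(ax)
--     return(score)
-- ===== SOURCE B (Python) =====
-- def raf_kol(n):
--     # Player a always plays its current maximum (getA with bl == 0), so round k
--     # (k = 0..n-1) pits a's card n-1-k against b's card k: a wins while
--     # n-1-k > k and b wins while k > n-1-k.  Counting those wins in closed form:
--     return {"a": 1 + (n - 2) // 2, "b": n // 2}
-- ===== Notes on version B (the rewrite author's own statement) =====
-- stated objective: faster
-- what changed: Replaced the O(n^2) game simulation (repeated membership scans and list.remove) by an O(1) closed form: player a always plays its current maximum, so round k pits n-1-k against k, giving a = 1 + (n-2)//2 and b = n//2 wins.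
import Mathlib
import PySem

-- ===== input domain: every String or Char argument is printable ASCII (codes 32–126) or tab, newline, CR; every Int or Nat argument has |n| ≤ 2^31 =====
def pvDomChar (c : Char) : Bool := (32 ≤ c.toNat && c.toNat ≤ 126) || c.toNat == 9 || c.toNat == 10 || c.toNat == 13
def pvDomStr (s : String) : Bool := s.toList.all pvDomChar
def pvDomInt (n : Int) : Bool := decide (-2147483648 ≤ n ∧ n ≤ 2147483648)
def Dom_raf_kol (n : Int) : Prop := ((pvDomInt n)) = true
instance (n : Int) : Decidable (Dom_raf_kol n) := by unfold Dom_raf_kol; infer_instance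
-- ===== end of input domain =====

-- B replaces A's game simulation by a closed form for both win counts (faster).

-- ===== PORT A =====
-- getA's 'for i in range(len(a))' loop (returns the first hit, none if the loop falls through)
def pvGetALoop (a : List Int) (bl : Int) : List Int → Option Int
  | [] => none
  | i :: rest => if bl - i ∈ a then some (bl - i) else pvGetALoop a bl rest

def pvGetA (a : List Int) (bl : Int) : Int :=
  if bl - 1 ∈ a then bl - 1
  else if bl = 0 then PySem.List.pyGetD a (PySem.List.len a - 1) 0
  else
    match pvGetALoop a bl (PySem.List.pyRange 0 (PySem.List.len a) 1) with
    | some v => v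
    | none => PySem.List.pyGetD a (PySem.List.len a - 1) 0

-- the 'for bx in b:' loop of raf_kol
def pvMainLoop (bl : Int) : List Int → List Int → PySem.Dict String Int → PySem.Dict String Int
  | [], _, score => score
  | bx :: rest, a, score =>
    let ax := pvGetA a bl
    let score' :=
      if ax > bx then score.modify "a" 0 (· + 1)
      else if bx > ax then score.modify "b" 0 (· + 1)
      else score
    pvMainLoop bl rest ((PySem.List.remove? a ax).getD a) score'

def raf_kol (n : Int) : List (String × Int) :=
  let a := PySem.List.pyRange 0 n 1
  let b := PySem.List.pyRange 0 n 1
  let score : PySem.Dict String Int := PySem.Dict.ofList [("a", 0), ("b", 0)]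
  let bx : Int := 0
  let bl := bx
  let ax := PySem.List.len a - 1
  let score :=
    if ax > bx then score.modify "a" 0 (· + 1)
    else if bx > ax then score.modify "b" 0 (· + 1)
    else score
  let a := (PySem.List.remove? a ax).getD a
  let b := (PySem.List.remove? b bx).getD b
  (pvMainLoop bl b a score).items

-- ===== PORT B =====
def raf_kol_alt (n : Int) : List (String × Int) :=
  [("a", 1 + PySem.Int.floordiv (n - 2) 2), ("b", PySem.Int.floordiv n 2)]

-- ===== PRECONDITION & SPEC =====
-- Pre_ excludes exactly n ≤ 0, on which A raises ValueError (a.remove(-1) on the empty list).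
def Pre_raf_kol (n : Int) : Prop := 1 ≤ n
instance (n : Int) : Decidable (Pre_raf_kol n) := by unfold Pre_raf_kol; infer_instance
def pvWitness_raf_kol : Int := 3

def Spec_raf_kol (n : Int) (out : List (String × Int)) : Prop := out = raf_kol_alt n
instance (n : Int) (out : List (String × Int)) : Decidable (Spec_raf_kol n out) := by unfold Spec_raf_kol; infer_instance

-- ===== CLAIM (what is proved, stated in full; the proofs are below) =====
def Claim_equal_raf_kol : Prop := ∀ (n : Int), Dom_raf_kol n → Pre_raf_kol n → Spec_raf_kol n (raf_kol n)

-- ===== LEMMAS AND PROOFS =====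

-- win counts of the simulated rounds: round i (of j rounds) pits ax = j-1-i against bx = c+i
def pvF : Nat → Int → Int
  | 0, _ => 0
  | j + 1, c => (if (j : Int) > c then 1 else 0) + pvF j (c + 1)

def pvG : Nat → Int → Int
  | 0, _ => 0
  | j + 1, c => (if c > (j : Int) then 1 else 0) + pvG j (c + 1)

lemma pvF_closed (j : Nat) : ∀ c : Int, pvF j c = max 0 (min (j : Int) (((j : Int) - c) / 2)) := by
  induction j with
  | zero => intro c; simp [pvF]
  | succ j ih =>
    intro c
    rw [pvF, ih (c + 1)]
    push_cast
    split_ifs with h <;> omega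

lemma pvG_closed (j : Nat) : ∀ c : Int, pvG j c = (j : Int) - min (j : Int) (max 0 (((j : Int) + 1 - c) / 2)) := by
  induction j with
  | zero => intro c; simp [pvG]
  | succ j ih =>
    intro c
    rw [pvG, ih (c + 1)]
    push_cast
    split_ifs with h <;> omega

lemma pvRemove_append_last {x : Int} : ∀ {l : List Int}, x ∉ l →
    PySem.List.remove? (l ++ [x]) x = some l := by
  intro l
  induction l with
  | nil => intro _; simp
  | cons y t ih =>
    intro h
    have hy : y ≠ x := by intro e; exact h (e ▸ List.mem_cons_self)
    rw [List.cons_append, PySem.List.remove?_cons_of_ne _ hy,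
      ih (fun hm => h (List.mem_cons_of_mem _ hm))]
    rfl

lemma pvGetA_range (m : Int) (hm : 1 ≤ m) :
    pvGetA (PySem.List.pyRange 0 m 1) 0 = m - 1 := by
  have hnot : (0 : Int) - 1 ∉ PySem.List.pyRange 0 m 1 := by
    simp [PySem.List.mem_pyRange_one]
  have hlenN : (PySem.List.pyRange 0 m 1).length = m.toNat := by
    simp [PySem.List.length_pyRange_one]
  have hlen : PySem.List.len (PySem.List.pyRange 0 m 1) = m := by
    simp [PySem.List.len_eq, hlenN]; omega
  rw [pvGetA, if_neg hnot, if_pos rfl, hlen,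
    PySem.List.pyGetD_eq_getElem _ 0 (by omega) (by rw [hlenN]; omega),
    PySem.List.getElem_pyRange_one]
  omega

lemma pvDict_modA (x y : Int) :
    (PySem.Dict.ofList [("a", x), ("b", y)]).modify "a" 0 (· + 1)
      = PySem.Dict.ofList [("a", x + 1), ("b", y)] := rfl

lemma pvDict_modB (x y : Int) :
    (PySem.Dict.ofList [("a", x), ("b", y)]).modify "b" 0 (· + 1)
      = PySem.Dict.ofList [("a", x), ("b", y + 1)] := rfl

lemma pvMainLoop_eq (j : Nat) : ∀ (c x y : Int),
    pvMainLoop 0 (PySem.List.pyRange c (c + (j : Int)) 1) (PySem.List.pyRange 0 (j : Int) 1)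
      (PySem.Dict.ofList [("a", x), ("b", y)])
    = PySem.Dict.ofList [("a", x + pvF j c), ("b", y + pvG j c)] := by
  induction j with
  | zero =>
    intro c x y
    rw [PySem.List.pyRange_one_eq_nil (by simp)]
    simp [pvMainLoop, pvF, pvG]
  | succ j ih =>
    intro c x y
    have hcast : (((j + 1 : Nat)) : Int) = (j : Int) + 1 := by push_cast; ring
    rw [hcast]
    rw [PySem.List.pyRange_one_cons (show c < c + ((j : Int) + 1) by omega)]
    have hget : pvGetA (PySem.List.pyRange 0 ((j : Int) + 1) 1) 0 = (j : Int) := by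
      have h := pvGetA_range ((j : Int) + 1) (by omega)
      simpa using h
    have hsplit : PySem.List.pyRange 0 ((j : Int) + 1) 1
        = PySem.List.pyRange 0 (j : Int) 1 ++ [(j : Int)] :=
      PySem.List.pyRange_one_succ_right (by positivity)
    have hrem : (PySem.List.remove? (PySem.List.pyRange 0 ((j : Int) + 1) 1) (j : Int)).getD
        (PySem.List.pyRange 0 ((j : Int) + 1) 1) = PySem.List.pyRange 0 (j : Int) 1 := by
      rw [hsplit, pvRemove_append_last (by simp [PySem.List.mem_pyRange_one])]
      rfl
    have htail : c + ((j : Int) + 1) = (c + 1) + (j : Int) := by ring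
    rw [pvMainLoop]
    simp only [hget, hrem, htail]
    by_cases h1 : (j : Int) > c
    · rw [if_pos h1, pvDict_modA, ih (c + 1) (x + 1) y]
      have ea : (x + 1) + pvF j (c + 1) = x + pvF (j + 1) c := by
        rw [pvF, if_pos h1]; ring
      have eb : y + pvG j (c + 1) = y + pvG (j + 1) c := by
        rw [pvG, if_neg (by omega)]; ring
      rw [ea, eb]
    · rw [if_neg h1]
      by_cases h2 : c > (j : Int)
      · rw [if_pos h2, pvDict_modB, ih (c + 1) x (y + 1)]
        have ea : x + pvF j (c + 1) = x + pvF (j + 1) c := by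
          rw [pvF, if_neg (by omega)]; ring
        have eb : (y + 1) + pvG j (c + 1) = y + pvG (j + 1) c := by
          rw [pvG, if_pos h2]; ring
        rw [ea, eb]
      · rw [if_neg h2, ih (c + 1) x y]
        have ea : x + pvF j (c + 1) = x + pvF (j + 1) c := by
          rw [pvF, if_neg (by omega)]; ring
        have eb : y + pvG j (c + 1) = y + pvG (j + 1) c := by
          rw [pvG, if_neg (by omega)]; ring
        rw [ea, eb]

-- ===== VERDICT (by name: the statement is the Claim_ definition above) =====
theorem raf_kol_spec : Claim_equal_raf_kol := by
  intro n _ hn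
  unfold Pre_raf_kol at hn
  unfold Spec_raf_kol raf_kol raf_kol_alt
  simp only []
  set j : Nat := (n - 1).toNat with hjdef
  have hj : (j : Int) = n - 1 := by omega
  have hlen : PySem.List.len (PySem.List.pyRange 0 n 1) = n := by
    simp [PySem.List.len_eq, PySem.List.length_pyRange_one]; omega
  have hsplitA : PySem.List.pyRange 0 n 1
      = PySem.List.pyRange 0 (n - 1) 1 ++ [n - 1] := by
    have h := PySem.List.pyRange_one_succ_right (a := 0) (b := n - 1) (by omega)
    simpa using h
  have hremA : (PySem.List.remove? (PySem.List.pyRange 0 n 1) (n - 1)).getD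
      (PySem.List.pyRange 0 n 1) = PySem.List.pyRange 0 (n - 1) 1 := by
    rw [hsplitA, pvRemove_append_last (by simp [PySem.List.mem_pyRange_one])]
    rfl
  have hremB : (PySem.List.remove? (PySem.List.pyRange 0 n 1) 0).getD
      (PySem.List.pyRange 0 n 1) = PySem.List.pyRange 1 n 1 := by
    rw [PySem.List.pyRange_one_cons (show (0:Int) < n by omega),
      PySem.List.remove?_cons_self]
    rfl
  have hb : PySem.List.pyRange 1 n 1 = PySem.List.pyRange 1 (1 + (j : Int)) 1 := by
    rw [hj]; ring_nf
  have ha : PySem.List.pyRange 0 (n - 1) 1 = PySem.List.pyRange 0 (j : Int) 1 := by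
    rw [hj]
  have hdiv2 : PySem.Int.floordiv (n - 2) 2 = (n - 2) / 2 :=
    PySem.Int.floordiv_eq_ediv_of_pos (by norm_num)
  have hdivn : PySem.Int.floordiv n 2 = n / 2 :=
    PySem.Int.floordiv_eq_ediv_of_pos (by norm_num)
  rw [hlen, hremA, hremB, hb, ha, hdiv2, hdivn]
  by_cases h1 : n - 1 > 0
  · rw [if_pos h1, pvDict_modA, pvMainLoop_eq j 1 (0 + 1) 0]
    have e1 : (0 : Int) + 1 + pvF j 1 = 1 + (n - 2) / 2 := by
      rw [pvF_closed j 1, hj]; omega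
    have e2 : (0 : Int) + pvG j 1 = n / 2 := by
      rw [pvG_closed j 1, hj]; omega
    rw [e1, e2]
    rfl
  · rw [if_neg h1, if_neg (by omega), pvMainLoop_eq j 1 0 0]
    have e1 : (0 : Int) + pvF j 1 = 1 + (n - 2) / 2 := by
      rw [pvF_closed j 1, hj]; omega
    have e2 : (0 : Int) + pvG j 1 = n / 2 := by
      rw [pvG_closed j 1, hj]; omega
    rw [e1, e2]
    rfl
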